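-- pv_equiv track=rewrite | github.com/WhalesBob/AlgorithmSolving | 프로그래머스/lv2/42626. 더 맵게/더 맵게.py | solution
-- ===== SOURCE A (Python) =====
-- import heapq
--
-- def solution(scoville, K):
--     heapq.heapify(scoville)
--     time = 0
--     while len(scoville) > 1 and scoville[0] < K:
--         time += 1
--         value = heapq.heappop(scoville) + 2 * heapq.heappop(scoville)
--         heapq.heappush(scoville, value)
--
--     return time if scoville[0] >= K else -1
-- ===== SOURCE B (Python) =====
-- def solution(scoville, K):
--     # Sorted-list variant: sort once (a copy, so the caller's list is not
--     # mutated), consume the two smallest at the front via a moving pointer,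
--     # and insert the combined value back at its ordered position found by
--     # binary search.
--     buf = sorted(scoville)
--     p = 0
--     time = 0
--     while len(buf) - p > 1 and buf[p] < K:
--         v = buf[p] + 2 * buf[p + 1]
--         p += 2
--         lo, hi = p, len(buf)
--         while lo < hi:
--             mid = (lo + hi) // 2
--             if buf[mid] < v:
--                 lo = mid + 1
--             else:
--                 hi = mid
--         buf.insert(lo, v)
--         time += 1
--     return time if buf[p] >= K else -1
-- ===== Notes on version B (the rewrite author's own statement) =====
-- stated objective: alternative
-- what changed: Replaces the binary heap with a plain sorted list: sort once (a copy, so the caller's list is not mutated), consume the two smallest at the front via a moving pointer, and re-insert the combined value at its ordered position found by a hand-rolled binary search.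
import Mathlib
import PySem

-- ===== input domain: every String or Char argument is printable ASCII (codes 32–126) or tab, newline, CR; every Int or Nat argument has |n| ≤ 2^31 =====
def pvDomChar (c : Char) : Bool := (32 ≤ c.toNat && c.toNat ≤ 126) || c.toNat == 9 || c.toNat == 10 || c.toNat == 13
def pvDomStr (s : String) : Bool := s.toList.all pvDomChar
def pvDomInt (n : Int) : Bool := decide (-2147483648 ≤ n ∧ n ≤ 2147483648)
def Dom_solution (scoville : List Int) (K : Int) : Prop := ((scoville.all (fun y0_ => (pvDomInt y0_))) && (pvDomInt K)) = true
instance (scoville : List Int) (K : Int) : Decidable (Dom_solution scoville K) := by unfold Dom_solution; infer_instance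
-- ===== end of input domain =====

-- B replaces the heap by a sorted list (sort once, consume the front through a
-- moving pointer, binary-search the ordered position of the combined value);
-- equivalence is about the RETURN value only — A heapifies the caller's list in
-- place, B works on a copy and does not mutate its argument.


-- ===== PORT A =====
-- heapq is a stdlib call in A; it is ported by its observable contract on a heap
-- of Ints: heap[0] and heappop yield the minimum value, heappop removes one
-- occurrence of it, heappush adds the element, heapify rearranges in place.
-- This is exact for A's RETURN value: A only observes the heap through its
-- length, heap[0] and heappop results, all of which depend only on the multiset
-- of Int values (equal Ints are indistinguishable).
def heapMin (l : List Int) : Int := (PySem.List.min? l (fun x => x)).getD 0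

theorem heapMin_mem (l : List Int) (h : l ≠ []) : heapMin l ∈ l := by
  unfold heapMin
  cases hm : PySem.List.min? l (fun x => x) with
  | none => rw [PySem.List.min?_eq_none_iff] at hm; exact absurd hm h
  | some m => simpa using PySem.List.min?_mem hm

-- the while loop of A: pop the two smallest, push their combination, count
def solutionLoop (heap : List Int) (K : Int) (time : Int) : Int :=
  if hc : 1 < heap.length ∧ heapMin heap < K then
    let m1 := heapMin heap
    let h1 := heap.erase m1
    let m2 := heapMin h1
    solutionLoop (h1.erase m2 ++ [m1 + 2 * m2]) K (time + 1)
  else if K ≤ heapMin heap then time else -1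
termination_by heap.length
decreasing_by
  have hm1 : heapMin heap ∈ heap := heapMin_mem heap (by cases heap <;> simp_all)
  have hl1 : (heap.erase (heapMin heap)).length = heap.length - 1 :=
    List.length_erase_of_mem hm1
  have hne : heap.erase (heapMin heap) ≠ [] := by
    intro h0; rw [h0] at hl1; simp at hl1; omega
  have hm2 : heapMin (heap.erase (heapMin heap)) ∈ heap.erase (heapMin heap) :=
    heapMin_mem _ hne
  have hl2 := List.length_erase_of_mem hm2
  simp only [List.length_append, List.length_cons, List.length_nil]
  omega

def solution (scoville : List Int) (K : Int) : Int :=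
  solutionLoop scoville K 0

-- ===== PORT B =====
-- the inner (binary-search) while loop of Source B; buf[mid] is ported as getD
-- (exact here: the loop keeps 0 ≤ mid < hi ≤ len(buf), so Python never raises)
def bsearch (buf : List Int) (v : Int) (lo hi : Nat) : Nat :=
  if lo < hi then
    let mid := (lo + hi) / 2
    if buf.getD mid 0 < v then bsearch buf v (mid + 1) hi
    else bsearch buf v lo mid
  else lo
termination_by hi - lo
decreasing_by all_goals omega

-- the outer while loop of Source B; p is the front pointer (a Python int that
-- stays in [0, len(buf)], ported as Nat); buf[p], buf[p+1] ported as getD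
-- (in range whenever the input list is nonempty, i.e. inside Pre_)
def bLoop (buf : List Int) (p : Nat) (K : Int) (time : Int) : Int :=
  if hc : 1 < buf.length - p ∧ buf.getD p 0 < K then
    let v := buf.getD p 0 + 2 * buf.getD (p + 1) 0
    let lo := bsearch buf v (p + 2) buf.length
    bLoop (PySem.List.insert buf (Int.ofNat lo) v) (p + 2) K (time + 1)
  else if K ≤ buf.getD p 0 then time else -1
termination_by buf.length - p
decreasing_by simp only [PySem.List.length_insert]; omega

def solution_alt (scoville : List Int) (K : Int) : Int :=
  bLoop (PySem.List.sorted scoville (fun x => x) false) 0 K 0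

-- ===== PRECONDITION & SPEC =====
-- A raises IndexError (scoville[0] on an empty list) iff scoville is empty.
def Pre_solution (scoville : List Int) (K : Int) : Prop := scoville ≠ []
instance (scoville : List Int) (K : Int) : Decidable (Pre_solution scoville K) := by
  unfold Pre_solution; infer_instance

def pvWitness_solution : List Int × Int := ([1, 2, 3, 9, 10, 12], 7)

def Spec_solution (scoville : List Int) (K : Int) (out : Int) : Prop := out = solution_alt scoville K
instance (scoville : List Int) (K : Int) (out : Int) : Decidable (Spec_solution scoville K out) := by unfold Spec_solution; infer_instance

-- ===== CLAIM (what is proved, stated in full; the proofs are below) =====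
def Claim_equal_solution : Prop := ∀ (scoville : List Int) (K : Int), Dom_solution scoville K → Pre_solution scoville K → Spec_solution scoville K (solution scoville K)

-- ===== LEMMAS AND PROOFS =====

-- abstraction of B's loop used only in the proofs: the sorted suffix as a list,
-- the splice as ordered insertion
def insertSorted (v : Int) : List Int → List Int
  | [] => [v]
  | x :: xs => if x < v then x :: insertSorted v xs else v :: x :: xs

theorem insertSorted_length (v : Int) (l : List Int) :
    (insertSorted v l).length = l.length + 1 := by
  induction l with
  | nil => rfl
  | cons x xs ih => simp only [insertSorted]; split <;> simp [ih]

def solutionAltLoop (buf : List Int) (K : Int) (time : Int) : Int :=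
  match buf with
  | a :: b :: rest =>
      if a < K then solutionAltLoop (insertSorted (a + 2 * b) rest) K (time + 1)
      else time
  | [a] => if K ≤ a then time else -1
  | [] => -1
termination_by buf.length
decreasing_by simp [insertSorted_length]

theorem insertSorted_perm (v : Int) (l : List Int) :
    (insertSorted v l).Perm (v :: l) := by
  induction l with
  | nil => rfl
  | cons x xs ih =>
      simp only [insertSorted]
      split
      · exact ((ih.cons x).trans (List.Perm.swap v x xs))
      · rfl

theorem insertSorted_pairwise (v : Int) (l : List Int)
    (hs : l.Pairwise (· ≤ ·)) : (insertSorted v l).Pairwise (· ≤ ·) := by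
  induction l with
  | nil => simp [insertSorted]
  | cons x xs ih =>
      rw [List.pairwise_cons] at hs
      simp only [insertSorted]
      split
      · rename_i hx
        rw [List.pairwise_cons]
        refine ⟨fun y hy => ?_, ih hs.2⟩
        rcases List.mem_cons.mp ((insertSorted_perm v xs).mem_iff.mp hy) with h | h
        · subst h; omega
        · exact hs.1 y h
      · rename_i hx
        rw [List.pairwise_cons]
        refine ⟨fun y hy => ?_, List.pairwise_cons.mpr hs⟩
        rcases List.mem_cons.mp hy with h | h
        · subst h; omega
        · exact le_trans (by omega) (hs.1 y h)

theorem insertSorted_eq_takeWhile (v : Int) (l : List Int) :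
    insertSorted v l =
      l.takeWhile (fun x => decide (x < v)) ++ v :: l.dropWhile (fun x => decide (x < v)) := by
  induction l with
  | nil => rfl
  | cons x xs ih =>
      simp only [insertSorted, List.takeWhile, List.dropWhile]
      by_cases hx : x < v
      · simp [hx, ih]
      · simp [hx]

theorem heapMin_of_perm_sorted (h : List Int) (a : Int) (rest : List Int)
    (hp : h.Perm (a :: rest)) (hs : (a :: rest).Pairwise (· ≤ ·)) :
    heapMin h = a := by
  have ha : a ∈ h := hp.mem_iff.mpr (List.mem_cons_self)
  have hlow : ∀ x ∈ h, a ≤ x := by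
    intro x hx
    rcases List.mem_cons.mp (hp.mem_iff.mp hx) with h' | h'
    · subst h'; exact le_refl x
    · exact (List.pairwise_cons.mp hs).1 x h'
  unfold heapMin
  cases hm : PySem.List.min? h (fun x => x) with
  | none =>
      rw [PySem.List.min?_eq_none_iff] at hm
      rw [hm] at ha; cases ha
  | some m =>
      have hmem : m ∈ h := PySem.List.min?_mem hm
      have h1 : m ≤ a := PySem.List.min?_isMin hm a ha
      have h2 : a ≤ m := hlow m hmem
      simpa using le_antisymm h1 h2

-- A's heap loop equals the abstract sorted-list loop on any sorted permutation
theorem loop_eq (n : Nat) : ∀ (h s : List Int) (K t : Int),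
    s.length ≤ n → h.Perm s → s.Pairwise (· ≤ ·) → s ≠ [] →
    solutionLoop h K t = solutionAltLoop s K t := by
  induction n with
  | zero =>
      intro h s K t hlen _ _ hne
      cases s with
      | nil => exact absurd rfl hne
      | cons a r => simp at hlen
  | succ n ih =>
      intro h s K t hlen hp hs hne
      cases s with
      | nil => exact absurd rfl hne
      | cons a rest =>
        cases rest with
        | nil =>
            -- one element left: both return (if K ≤ a then t else -1)
            have hl : h.length = 1 := by simpa using hp.length_eq
            have hma : heapMin h = a := heapMin_of_perm_sorted h a [] hp hs
            rw [solutionLoop]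
            simp only [hl, hma, solutionAltLoop]
            split
            · omega
            · rfl
        | cons b rest' =>
            have hl : h.length = rest'.length + 2 := by simpa using hp.length_eq
            have hma : heapMin h = a := heapMin_of_perm_sorted h a (b :: rest') hp hs
            have hp1 : (h.erase a).Perm (b :: rest') := by
              have := hp.erase a
              rwa [List.erase_cons_head] at this
            have hs1 : (b :: rest').Pairwise (· ≤ ·) := (List.pairwise_cons.mp hs).2
            have hmb : heapMin (h.erase a) = b := heapMin_of_perm_sorted _ b rest' hp1 hs1
            have hp2 : ((h.erase a).erase b).Perm rest' := by
              have := hp1.erase b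
              rwa [List.erase_cons_head] at this
            have hab : a ≤ b := (List.pairwise_cons.mp hs).1 b List.mem_cons_self
            rw [solutionLoop]
            by_cases hK : a < K
            · have hcond : 1 < h.length ∧ heapMin h < K := ⟨by omega, by omega⟩
              rw [dif_pos hcond]
              simp only [hma, hmb]
              have hrec : (((h.erase a).erase b) ++ [a + 2 * b]).Perm
                  (insertSorted (a + 2 * b) rest') :=
                ((List.perm_append_singleton _ _).trans
                  (hp2.cons (a + 2 * b))).trans (insertSorted_perm _ _).symm
              have hsr : (insertSorted (a + 2 * b) rest').Pairwise (· ≤ ·) :=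
                insertSorted_pairwise _ _ (List.pairwise_cons.mp hs1).2
              have hner : insertSorted (a + 2 * b) rest' ≠ [] := by
                intro h0
                have := insertSorted_length (a + 2 * b) rest'
                rw [h0] at this; simp at this
              have hlenr : (insertSorted (a + 2 * b) rest').length ≤ n := by
                rw [insertSorted_length]
                simp at hlen; omega
              rw [ih _ _ K (t + 1) hlenr hrec hsr hner]
              simp [solutionAltLoop, hK]
            · have hcond : ¬ (1 < h.length ∧ heapMin h < K) := by
                rw [hma]; intro hc; exact hK hc.2
              rw [dif_neg hcond, hma, if_pos (by omega)]
              simp [solutionAltLoop, hK]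

-- characterisation of the bisect-left boundary in a sorted list:
-- l[j] < v exactly for the j below the takeWhile length
theorem takeWhile_boundary (l : List Int) (v : Int) (hs : l.Pairwise (· ≤ ·))
    (j : Nat) (hj : j < l.length) :
    (l[j] < v ↔ j < (l.takeWhile (fun x => decide (x < v))).length) := by
  have hsplit : l.takeWhile (fun x => decide (x < v)) ++ l.dropWhile (fun x => decide (x < v)) = l :=
    List.takeWhile_append_dropWhile
  have htwle : (l.takeWhile (fun x => decide (x < v))).length ≤ l.length :=
    (l.takeWhile_sublist _).length_le
  constructor
  · intro hlt
    by_contra hge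
    push_neg at hge
    -- j is in the dropWhile part, whose head fails the test; use sortedness
    have hdwne : l.dropWhile (fun x => decide (x < v)) ≠ [] := by
      intro h0
      have := congrArg List.length hsplit
      rw [h0] at this
      simp at this
      omega
    have hhead0 : ¬ ((l.dropWhile (fun x => decide (x < v))).head hdwne < v) := by
      have := List.head_dropWhile_not (fun x => decide (x < v)) hdwne
      simpa using this
    have hTlt : (l.takeWhile (fun x => decide (x < v))).length < l.length := by omega
    have hheadeq : l[(l.takeWhile (fun x => decide (x < v))).length]'hTlt =
        (l.dropWhile (fun x => decide (x < v))).head hdwne := by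
      rw [List.getElem_of_eq hsplit.symm, List.getElem_append_right (le_refl _)]
      simp [List.head_eq_getElem]
    have hhead' : ¬ (l[(l.takeWhile (fun x => decide (x < v))).length]'hTlt < v) := by
      rw [hheadeq]; exact hhead0
    rcases Nat.eq_or_lt_of_le hge with he | hlt'
    · subst he
      exact absurd hlt hhead'
    · have := (List.pairwise_iff_getElem.mp hs) _ j hTlt hj hlt'
      omega
  · intro hlt
    have hpref : l.takeWhile (fun x => decide (x < v)) <+: l := List.takeWhile_prefix _
    have heq : (l.takeWhile (fun x => decide (x < v)))[j]'hlt = l[j] := hpref.getElem hlt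
    have hmem := List.mem_takeWhile_imp (List.getElem_mem hlt)
    rw [heq] at hmem
    simpa using hmem

-- buf[k] seen through the sorted suffix buf.drop p0
theorem getD_drop_eq (buf : List Int) (p0 k : Nat) (h1 : p0 ≤ k) (h2 : k < buf.length) :
    buf.getD k 0 = (buf.drop p0).getD (k - p0) 0 := by
  rw [List.getD_eq_getElem?_getD, List.getD_eq_getElem?_getD, List.getElem?_drop,
    Nat.add_sub_cancel' h1]

-- the hand-rolled binary search computes the bisect-left boundary
theorem bsearch_eq (buf : List Int) (v : Int) (p0 : Nat) (hp0 : p0 ≤ buf.length)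
    (hs : (buf.drop p0).Pairwise (· ≤ ·)) :
    ∀ (n lo hi : Nat), hi - lo ≤ n → p0 ≤ lo → hi ≤ buf.length →
    lo ≤ p0 + ((buf.drop p0).takeWhile (fun x => decide (x < v))).length →
    p0 + ((buf.drop p0).takeWhile (fun x => decide (x < v))).length ≤ hi →
    bsearch buf v lo hi = p0 + ((buf.drop p0).takeWhile (fun x => decide (x < v))).length := by
  intro n
  induction n with
  | zero =>
      intro lo hi hfuel _ _ hloT hThi
      rw [bsearch, if_neg (by omega)]
      omega
  | succ n ih =>
      intro lo hi hfuel hplo hhi hloT hThi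
      rw [bsearch]
      by_cases hlh : lo < hi
      · rw [if_pos hlh]
        have hmid1 : lo ≤ (lo + hi) / 2 := by omega
        have hmid2 : (lo + hi) / 2 < hi := by omega
        have hmlen : (lo + hi) / 2 - p0 < (buf.drop p0).length := by
          rw [List.length_drop]; omega
        have hchar := takeWhile_boundary (buf.drop p0) v hs ((lo + hi) / 2 - p0) hmlen
        have hget : buf.getD ((lo + hi) / 2) 0 = (buf.drop p0)[(lo + hi) / 2 - p0]'hmlen := by
          rw [getD_drop_eq buf p0 _ (by omega) (by omega),
            List.getD_eq_getElem (buf.drop p0) 0 hmlen]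
        by_cases hv : buf.getD ((lo + hi) / 2) 0 < v
        · rw [if_pos hv]
          rw [hget] at hv
          have hT := hchar.mp hv
          exact ih ((lo + hi) / 2 + 1) hi (by omega) (by omega) hhi (by omega) hThi
        · rw [if_neg hv]
          have hT : ¬ ((lo + hi) / 2 - p0 <
              ((buf.drop p0).takeWhile (fun x => decide (x < v))).length) := by
            intro hc
            exact hv (by rw [hget]; exact hchar.mpr hc)
          exact ih lo ((lo + hi) / 2) (by omega) hplo (by omega) hloT (by omega)
      · rw [if_neg hlh]
        omega

-- B's pointer/binary-search loop equals the abstract sorted-list loop on the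
-- suffix from the pointer
theorem bLoop_eq (n : Nat) : ∀ (buf : List Int) (p : Nat) (K t : Int),
    buf.length - p ≤ n → p < buf.length → (buf.drop p).Pairwise (· ≤ ·) →
    bLoop buf p K t = solutionAltLoop (buf.drop p) K t := by
  induction n with
  | zero =>
      intro buf p K t hlen hplen _
      omega
  | succ n ih =>
      intro buf p K t hlen hplen hs
      cases hdp : buf.drop p with
      | nil =>
          have := congrArg List.length hdp
          rw [List.length_drop] at this
          simp at this
          omega
      | cons a rest0 =>
        have hlp : buf.length - p = rest0.length + 1 := by
          have := congrArg List.length hdp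
          rw [List.length_drop] at this
          simpa using this
        have hpa : buf.getD p 0 = a := by
          rw [getD_drop_eq buf p p (le_refl _) hplen, hdp]
          simp
        cases hr0 : rest0 with
        | nil =>
            rw [bLoop, dif_neg (by rw [hlp, hr0]; simp), hpa]
            simp only [solutionAltLoop]
        | cons b rest =>
          subst hr0
          simp only [List.length_cons] at hlp
          have hpb : buf.getD (p + 1) 0 = b := by
            rw [getD_drop_eq buf p (p + 1) (by omega) (by omega), hdp]
            simp
          have hrest : buf.drop (p + 2) = rest := by
            have h2 : (buf.drop p).drop 2 = rest := by rw [hdp]; rfl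
            rw [List.drop_drop] at h2
            simpa [Nat.add_comm] using h2
          have hsrest : rest.Pairwise (· ≤ ·) := by
            rw [hdp] at hs
            exact ((List.pairwise_cons.mp (List.pairwise_cons.mp hs).2).2)
          rw [bLoop]
          by_cases hK : a < K
          · rw [dif_pos (by rw [hpa]; exact ⟨by omega, hK⟩)]
            simp only [hpa, hpb]
            have htwle : ((rest.takeWhile (fun x => decide (x < a + 2 * b))).length) ≤ rest.length :=
              (rest.takeWhile_sublist _).length_le
            have hbs : bsearch buf (a + 2 * b) (p + 2) buf.length =
                (p + 2) + (rest.takeWhile (fun x => decide (x < a + 2 * b))).length := by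
              have := bsearch_eq buf (a + 2 * b) (p + 2) (by omega)
                (by rw [hrest]; exact hsrest)
                (buf.length - (p + 2)) (p + 2) buf.length (by omega) (le_refl _)
                (le_refl _) (by rw [hrest]; omega) (by rw [hrest]; omega)
              rw [this, hrest]
            rw [hbs]
            set T := (p + 2) + (rest.takeWhile (fun x => decide (x < a + 2 * b))).length with hT
            set v := a + 2 * b with hv
            have hTlen : T ≤ buf.length := by omega
            have hins : PySem.List.insert buf (Int.ofNat T) v =
                buf.take T ++ v :: buf.drop T := PySem.List.insert_natCast buf T v hTlen
            -- the suffix of the spliced buffer from the new pointer is the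
            -- ordered insertion of v into rest
            have hsplitr : rest.takeWhile (fun x => decide (x < v)) ++
                rest.dropWhile (fun x => decide (x < v)) = rest :=
              List.takeWhile_append_dropWhile
            have hdropins : (buf.take T ++ v :: buf.drop T).drop (p + 2) =
                insertSorted v rest := by
              rw [List.drop_append]
              have hlt : (buf.take T).length = T := by
                rw [List.length_take]; omega
              have htk := congrArg (List.take (rest.takeWhile (fun x => decide (x < v))).length) hsplitr
              rw [List.take_left] at htk
              have hdr := congrArg (List.drop (rest.takeWhile (fun x => decide (x < v))).length) hsplitr
              rw [List.drop_left] at hdr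
              have h1 : (buf.take T).drop (p + 2) =
                  rest.takeWhile (fun x => decide (x < v)) := by
                rw [List.drop_take, hrest, hT]
                have heq : (p + 2) + (rest.takeWhile (fun x => decide (x < v))).length - (p + 2) =
                    (rest.takeWhile (fun x => decide (x < v))).length := by omega
                rw [heq]
                exact htk.symm
              have h2 : buf.drop T = rest.dropWhile (fun x => decide (x < v)) := by
                rw [hT, ← List.drop_drop, hrest]
                exact hdr.symm
              have h3 : (v :: buf.drop T).drop ((p + 2) - (buf.take T).length) =
                  v :: buf.drop T := by
                rw [hlt, show (p + 2) - T = 0 by omega]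
                rfl
              rw [h1, h3, h2, insertSorted_eq_takeWhile]
            have hlen' : (PySem.List.insert buf (Int.ofNat T) v).length - (p + 2) ≤ n := by
              rw [PySem.List.length_insert]
              omega
            have hplen' : p + 2 < (PySem.List.insert buf (Int.ofNat T) v).length := by
              rw [PySem.List.length_insert]
              omega
            have hs' : ((PySem.List.insert buf (Int.ofNat T) v).drop (p + 2)).Pairwise (· ≤ ·) := by
              rw [hins, hdropins]
              exact insertSorted_pairwise v rest hsrest
            rw [ih _ _ K (t + 1) hlen' hplen' hs', hins, hdropins]
            simp only [solutionAltLoop]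
            rw [if_pos hK, ← hv]
          · rw [dif_neg (by rw [hpa]; intro hc; exact hK hc.2), hpa]
            simp only [solutionAltLoop]
            rw [if_pos (show K ≤ a by omega), if_neg hK]

-- ===== VERDICT (by name: the statement is the Claim_ definition above) =====
theorem solution_spec : Claim_equal_solution := by
  intro scoville K _ hpre
  unfold Spec_solution solution solution_alt
  have hlen : (PySem.List.sorted scoville (fun x => x) false).length = scoville.length :=
    PySem.List.length_sorted ..
  have hpos : 0 < scoville.length := by
    cases scoville with
    | nil => exact absurd rfl hpre
    | cons x xs => simp
  rw [bLoop_eq (PySem.List.sorted scoville (fun x => x) false).length _ 0 K 0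
    (by omega) (by omega) (by simpa using PySem.List.sorted_pairwise scoville (fun x => x))]
  simp only [List.drop_zero]
  exact loop_eq (PySem.List.sorted scoville (fun x => x) false).length
    scoville _ K 0 (le_refl _)
    (PySem.List.sorted_perm scoville (fun x => x) false).symm
    (PySem.List.sorted_pairwise scoville (fun x => x))
    (fun h0 => hpre ((PySem.List.sorted_eq_nil_iff scoville (fun x => x) false).mp h0))
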